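-- pv_equiv track=rewrite | github.com/xjywhu/ComUICoder | ComUICoder/eval_metrics.py | merge_list_to_clusters
-- ===== SOURCE A (Python) =====
-- from collections import defaultdict
--
-- def merge_list_to_clusters(n, merge_list):
--     parent = list(range(n))
--
--     def find(x):
--         while parent[x] != x:
--             parent[x] = parent[parent[x]]
--             x = parent[x]
--         return x
--
--     def union(a, b):
--         pa, pb = find(a), find(b)
--         if pa != pb:
--             parent[pb] = pa
--
--     for i, j in merge_list:
--         union(i, j)
--     clusters = defaultdict(list)
--     for i in range(n):
--         clusters[find(i)].append(i)
--
--     return list(clusters.values())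
-- ===== SOURCE B (Python) =====
-- def merge_list_to_clusters(n, merge_list):
--     # Flat label array: each index carries its cluster representative directly.
--     # Merging relabels the absorbed class in one scan; no parent trees, no find/union.
--     label = list(range(n))
--     for i, j in merge_list:
--         li, lj = label[i], label[j]
--         if li != lj:
--             label = [li if v == lj else v for v in label]
--     clusters = {}
--     for v in range(n):
--         clusters.setdefault(label[v], []).append(v)
--     return list(clusters.values())
-- ===== Notes on version B (the rewrite author's own statement) =====
-- stated objective: simpler
-- what changed: Replaces the union-find forest (parent array, path-halving find, union) with a flat label array that is relabelled in one scan per effective merge, then a plain dict grouping pass.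
import Mathlib
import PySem

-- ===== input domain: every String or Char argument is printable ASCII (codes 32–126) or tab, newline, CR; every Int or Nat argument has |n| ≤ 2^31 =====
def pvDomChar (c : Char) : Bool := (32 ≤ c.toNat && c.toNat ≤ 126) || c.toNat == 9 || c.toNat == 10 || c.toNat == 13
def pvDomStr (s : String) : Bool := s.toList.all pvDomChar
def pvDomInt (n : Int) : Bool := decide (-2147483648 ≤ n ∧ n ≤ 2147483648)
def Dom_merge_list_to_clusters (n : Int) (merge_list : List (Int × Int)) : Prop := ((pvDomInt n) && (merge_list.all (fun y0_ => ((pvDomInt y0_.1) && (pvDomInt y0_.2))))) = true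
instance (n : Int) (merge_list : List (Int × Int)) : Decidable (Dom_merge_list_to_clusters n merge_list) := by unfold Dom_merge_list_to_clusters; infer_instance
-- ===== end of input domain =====

-- B replaces A's union-find forest (parent array, path-halving find) by a flat label
-- array relabelled in one scan per effective merge; objective: simpler (not faster).
-- A mutates no caller-visible argument; the equivalence is about the return value.

-- ===== PORT A =====
-- while parent[x] != x: parent[x] = parent[parent[x]]; x = parent[x]
-- (fuel bounds the while loop; fuel n+len(merge_list)+1 is proven sufficient under Pre_)
def findA : Nat → List Int → Int → List Int × Int
  | 0, p, x => (p, x)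
  | f+1, p, x =>
    match PySem.List.pyGet? p x with
    | none => (p, x)      -- IndexError in Python: excluded by Pre_
    | some px =>
      if px = x then (p, x)
      else
        let gp := PySem.List.pyGetD p px 0        -- parent[parent[x]]  (px is a stored parent, always in range under Pre_)
        findA f (PySem.List.pySetD p x gp) gp     -- parent[x] = gp; x = parent[x] (the value just written)

def unionA (F : Nat) (p : List Int) (a b : Int) : List Int :=
  let ra := findA F p a
  let rb := findA F ra.1 b
  if ra.2 ≠ rb.2 then PySem.List.pySetD rb.1 rb.2 ra.2 else rb.1

def merge_list_to_clusters (n : Int) (merge_list : List (Int × Int)) : List (List Int) :=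
  let parent0 := PySem.List.pyRange 0 n 1                         -- parent = list(range(n))
  let F := parent0.length + merge_list.length + 1                 -- fuel for find's while loop
  let parent := merge_list.foldl (fun p ij => unionA F p ij.1 ij.2) parent0
  let res := (PySem.List.pyRange 0 n 1).foldl                     -- for i in range(n): clusters[find(i)].append(i)
      (fun (st : List Int × PySem.Dict Int (List Int)) i =>
        let fr := findA F st.1 i
        (fr.1, st.2.insert fr.2 (st.2.getD fr.2 [] ++ [i])))
      (parent, PySem.Dict.empty)
  res.2.values

-- ===== PORT B =====
def merge_list_to_clusters_alt (n : Int) (merge_list : List (Int × Int)) : List (List Int) :=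
  let label := merge_list.foldl
      (fun (L : List Int) ij =>
        let li := PySem.List.pyGetD L ij.1 0     -- label[i]  (in range under Pre_)
        let lj := PySem.List.pyGetD L ij.2 0     -- label[j]
        if li ≠ lj then L.map (fun v => if v = lj then li else v) else L)
      (PySem.List.pyRange 0 n 1)                 -- label = list(range(n))
  let clusters := (PySem.List.pyRange 0 n 1).foldl
      (fun (d : PySem.Dict Int (List Int)) v =>
        let k := PySem.List.pyGetD label v 0
        d.insert k (d.getD k [] ++ [v]))
      PySem.Dict.empty
  clusters.values

-- ===== PRECONDITION & SPEC =====
-- Pre_ excludes exactly the inputs where A raises IndexError: a merge pair with an index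
-- outside [-n, n) (Python's negative indices down to -n are accepted and wrap; both A and B wrap them).
def Pre_merge_list_to_clusters (n : Int) (merge_list : List (Int × Int)) : Prop :=
  ∀ ij ∈ merge_list, (-n ≤ ij.1 ∧ ij.1 < n) ∧ (-n ≤ ij.2 ∧ ij.2 < n)
instance (n : Int) (merge_list : List (Int × Int)) : Decidable (Pre_merge_list_to_clusters n merge_list) := by
  unfold Pre_merge_list_to_clusters; infer_instance

def pvWitness_merge_list_to_clusters : Int × (List (Int × Int)) := (4, [(0, 2), (-1, 1), (2, 0)])

def Spec_merge_list_to_clusters (n : Int) (merge_list : List (Int × Int)) (out : List (List Int)) : Prop := out = merge_list_to_clusters_alt n merge_list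
instance (n : Int) (merge_list : List (Int × Int)) (out : List (List Int)) : Decidable (Spec_merge_list_to_clusters n merge_list out) := by unfold Spec_merge_list_to_clusters; infer_instance

-- ===== CLAIM (what is proved, stated in full; the proofs are below) =====
def Claim_equal_merge_list_to_clusters : Prop := ∀ (n : Int) (merge_list : List (Int × Int)), Dom_merge_list_to_clusters n merge_list → Pre_merge_list_to_clusters n merge_list → Spec_merge_list_to_clusters n merge_list (merge_list_to_clusters n merge_list)

-- ===== LEMMAS AND PROOFS =====

-- proof-side abbreviations
def gI (xs : List Int) (i : Int) : Int := PySem.List.pyGetD xs i 0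

def iterP (p : List Int) : Nat → Int → Int
  | 0, x => x
  | s+1, x => iterP p s (gI p x)

def InR (N : Nat) (x : Int) : Prop := 0 ≤ x ∧ x < (N : Int)

-- the coupling invariant: L is B's label array, p is A's parent array, b bounds the
-- length of every parent chain; gI L x is the root of x's tree.
def UFInv (N : Nat) (p L : List Int) (b : Nat) : Prop :=
  p.length = N ∧ L.length = N ∧
  (∀ x, InR N x → InR N (gI L x) ∧ gI L (gI L x) = gI L x) ∧
  (∀ x, InR N x → InR N (gI p x) ∧ gI L (gI p x) = gI L x) ∧
  (∀ x, InR N x → gI p (gI L x) = gI L x) ∧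
  (∀ x, InR N x → ∃ s, s ≤ b ∧ iterP p s x = gI L x)

def relabel (L : List Int) (li lj : Int) : List Int := L.map (fun v => if v = lj then li else v)

lemma gI_eq_getElem (xs : List Int) (x : Int) (h0 : 0 ≤ x) (h1 : x < xs.length) :
    gI xs x = xs[x.toNat]'(by omega) := PySem.List.pyGetD_eq_getElem xs 0 h0 h1

lemma gI_set (p : List Int) (i v j : Int) (hi0 : 0 ≤ i) (_hi1 : i < p.length)
    (hj0 : 0 ≤ j) (hj1 : j < p.length) :
    gI (PySem.List.pySetD p i v) j = if j = i then v else gI p j := by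
  rw [PySem.List.pySetD_of_nonneg p v hi0]
  rw [gI_eq_getElem _ _ hj0 (by simpa using hj1), gI_eq_getElem _ _ hj0 hj1]
  rw [List.getElem_set]
  by_cases h : j = i
  · simp [h]
  · rw [if_neg (by omega), if_neg h]

lemma length_pySetD' (p : List Int) (i v : Int) : (PySem.List.pySetD p i v).length = p.length :=
  PySem.List.length_pySetD p i v

lemma gI_neg (xs : List Int) (i : Int) (h0 : -(xs.length : Int) ≤ i) (h1 : i < 0) :
    gI xs i = gI xs (i + xs.length) := by
  have hk : (-i).toNat ≤ xs.length := by omega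
  have hneg := PySem.List.pyGetD_neg_natCast xs (-i).toNat (0:Int) (by omega) hk
  rw [show (-(((-i).toNat : Nat) : Int)) = i by omega] at hneg
  unfold gI
  rw [hneg, PySem.List.pyGetD_eq_getElem xs 0 (by omega) (by omega)]
  congr 1
  omega

lemma pySetD_neg (xs : List Int) (i v : Int) (h0 : -(xs.length : Int) ≤ i) (h1 : i < 0) :
    PySem.List.pySetD xs i v = PySem.List.pySetD xs (i + xs.length) v := by
  rw [PySem.List.pySetD_of_nonneg xs v (by omega : (0:Int) ≤ i + xs.length)]
  simp only [PySem.List.pySetD, PySem.List.pySet?, PySem.List.pyIdx?,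
    if_neg (by omega : ¬ (0:Int) ≤ i), if_pos h0]
  simp only [Option.map_some, Option.getD_some]
  congr 1
  omega

lemma pySetD_self (p : List Int) (i : Int) (h0 : 0 ≤ i) (h1 : i < p.length) :
    PySem.List.pySetD p i (gI p i) = p := by
  rw [PySem.List.pySetD_of_nonneg p _ h0, gI_eq_getElem _ _ h0 h1]
  exact List.set_getElem_self (by omega)

lemma iterP_fixed (p : List Int) (x : Int) (h : gI p x = x) : ∀ s, iterP p s x = x := by
  intro s; induction s with
  | zero => rfl
  | succ s ih => simp [iterP, h, ih]

lemma Inv_mono {N p L b b'} (h : UFInv N p L b) (hb : b ≤ b') : UFInv N p L b' := by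
  obtain ⟨h1, h2, h3, h4, h5, h6⟩ := h
  refine ⟨h1, h2, h3, h4, h5, fun x hx => ?_⟩
  obtain ⟨s, hs, hiter⟩ := h6 x hx
  exact ⟨s, by omega, hiter⟩

lemma gI_relabel (L : List Int) (li lj y : Int) (h0 : 0 ≤ y) (h1 : y < L.length) :
    gI (relabel L li lj) y = if gI L y = lj then li else gI L y := by
  unfold relabel
  rw [gI_eq_getElem _ _ h0 (by simpa using h1), gI_eq_getElem _ _ h0 h1]
  simp

lemma gI_set' {N} {p : List Int} (hplen : p.length = N) (x v : Int) (hx : InR N x) (j : Int)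
    (hj : InR N j) : gI (PySem.List.pySetD p x v) j = if j = x then v else gI p j := by
  apply gI_set <;> simp [InR] at hx hj <;> omega

lemma dist_halve {N p L b} (hInv : UFInv N p L b) (x : Int) (hx : InR N x) :
    ∀ s y, InR N y → iterP p s y = gI L y →
      ∃ s', s' ≤ s ∧ iterP (PySem.List.pySetD p x (gI p (gI p x))) s' y = gI L y := by
  obtain ⟨hplen, hLlen, hLcl, hpcl, hroot, _⟩ := hInv
  intro s
  induction s using Nat.strong_induction_on with
  | _ s ih =>
    intro y hy hit
    match s with
    | 0 => exact ⟨0, le_refl _, hit⟩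
    | Nat.succ t =>
      have hstep : iterP p t (gI p y) = gI L y := hit
      by_cases hyx : y = x
      · subst hyx
        have hz := hpcl y hy
        have hgset : gI (PySem.List.pySetD p y (gI p (gI p y))) y = gI p (gI p y) :=
          by rw [gI_set' hplen _ _ hy _ hy, if_pos rfl]
        match t with
        | 0 =>
          -- gI p y = gI L y is a root
          have hzr : gI p y = gI L y := hstep
          have hrootz : gI p (gI p y) = gI p y := by rw [hzr]; exact hroot y hy
          refine ⟨1, by omega, ?_⟩
          show gI (PySem.List.pySetD p y (gI p (gI p y))) y = gI L y
          rw [hgset, hrootz]; exact hzr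
        | Nat.succ u =>
          have hw : iterP p u (gI p (gI p y)) = gI L y := hstep
          have hzIn := (hpcl y hy).1
          have hwIn := (hpcl _ hzIn).1
          have hLw : gI L (gI p (gI p y)) = gI L y := by
            rw [(hpcl _ hzIn).2, (hpcl y hy).2]
          obtain ⟨s', hs', hit'⟩ := ih u (by omega) (gI p (gI p y)) hwIn (by rw [hLw]; exact hw)
          refine ⟨s' + 1, by omega, ?_⟩
          show iterP _ s' (gI (PySem.List.pySetD p y (gI p (gI p y))) y) = gI L y
          rw [hgset]; rw [hLw] at hit'; exact hit'
      · have hz := hpcl y hy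
        obtain ⟨s', hs', hit'⟩ := ih t (by omega) (gI p y) hz.1 (by rw [hz.2]; exact hstep)
        refine ⟨s' + 1, by omega, ?_⟩
        show iterP _ s' (gI (PySem.List.pySetD p x (gI p (gI p x))) y) = gI L y
        rw [gI_set' hplen _ _ hx _ hy, if_neg hyx, hit', hz.2]

lemma Inv_halve {N p L b} (hInv : UFInv N p L b) (x : Int) (hx : InR N x) :
    UFInv N (PySem.List.pySetD p x (gI p (gI p x))) L b := by
  have hd := dist_halve hInv x hx
  obtain ⟨hplen, hLlen, hLcl, hpcl, hroot, hdist⟩ := hInv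
  refine ⟨by rw [length_pySetD']; exact hplen, hLlen, hLcl, ?_, ?_, ?_⟩
  · intro z hz
    rw [gI_set' hplen _ _ hx _ hz]
    by_cases h : z = x
    · rw [if_pos h]
      have h1 := hpcl z hz
      have h2 := hpcl _ (hpcl x hx).1
      subst h
      exact ⟨h2.1, by rw [h2.2, h1.2]⟩
    · rw [if_neg h]; exact hpcl z hz
  · intro z hz
    have hLz := (hLcl z hz).1
    rw [gI_set' hplen _ _ hx _ hLz]
    by_cases h : gI L z = x
    · rw [if_pos h]
      have hfix : gI p x = x := by rw [← h]; exact hroot z hz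
      rw [hfix, hfix]; exact h.symm
    · rw [if_neg h]; exact hroot z hz
  · intro z hz
    obtain ⟨s, hs, hit⟩ := hdist z hz
    obtain ⟨s', hs', hit'⟩ := hd s z hz hit
    exact ⟨s', by omega, hit'⟩

lemma find_correct {N L b} : ∀ s F (p : List Int) (x : Int), UFInv N p L b → InR N x →
    iterP p s x = gI L x → s < F →
    (findA F p x).2 = gI L x ∧ UFInv N (findA F p x).1 L b := by
  intro s
  induction s using Nat.strong_induction_on with
  | _ s ih =>
    intro F p x hInv hx hit hsF
    have hInv0 := hInv
    obtain ⟨hplen, hLlen, hLcl, hpcl, hroot, hdist⟩ := hInv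
    obtain ⟨f, rfl⟩ : ∃ f, F = f + 1 := ⟨F - 1, by omega⟩
    have hx' : 0 ≤ x ∧ x < (p.length : Int) := by
      obtain ⟨a, c⟩ := hx; rw [hplen]; exact ⟨a, c⟩
    have hxget : PySem.List.pyGet? p x = some (gI p x) := by
      rw [gI_eq_getElem p x hx'.1 hx'.2]
      exact PySem.List.pyGet?_eq_some_getElem p hx'.1 hx'.2
    by_cases hpx : gI p x = x
    · have hLx : gI L x = x := by rw [← hit]; exact iterP_fixed p x hpx s
      simp only [findA, hxget, if_pos hpx]
      exact ⟨hLx.symm, hInv0⟩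
    · have hs1 : s ≠ 0 := by
        intro h; subst h
        have hxx : x = gI L x := by simpa [iterP] using hit
        have : gI p x = x := by rw [hxx]; exact hroot x hx
        exact hpx this
      obtain ⟨t, rfl⟩ : ∃ t, s = t + 1 := ⟨s - 1, by omega⟩
      have hstep : iterP p t (gI p x) = gI L x := hit
      have hzIn := (hpcl x hx).1
      have hwIn := (hpcl _ hzIn).1
      have hLz : gI L (gI p x) = gI L x := (hpcl x hx).2
      have hLw : gI L (gI p (gI p x)) = gI L x := by rw [(hpcl _ hzIn).2, hLz]
      have hwit : ∃ u, u ≤ t ∧ iterP p u (gI p (gI p x)) = gI L x := by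
        match t, hstep with
        | 0, hstep =>
          have hzr : gI p x = gI L x := hstep
          exact ⟨0, le_refl _, by show gI p (gI p x) = gI L x; rw [hzr]; exact hroot x hx⟩
        | u+1, hstep => exact ⟨u, by omega, hstep⟩
      obtain ⟨u, hu, hwitu⟩ := hwit
      have hInv' := Inv_halve hInv0 x hx
      obtain ⟨s', hs', hit'⟩ := dist_halve hInv0 x hx u _ hwIn (by rw [hLw]; exact hwitu)
      have hres := ih s' (by omega) f (PySem.List.pySetD p x (gI p (gI p x)))
        (gI p (gI p x)) hInv' hwIn hit' (by omega)
      simp only [findA, hxget, if_neg hpx]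
      rw [hLw] at hres
      exact hres

lemma findA_step (f : Nat) (p : List Int) (x px : Int) (h : PySem.List.pyGet? p x = some px) :
    findA (f+1) p x =
      if px = x then (p, x)
      else findA f (PySem.List.pySetD p x (gI p px)) (gI p px) := by
  simp only [findA, h, gI]

lemma find_neg {N L b} (F : Nat) (p : List Int) (x : Int) (hInv : UFInv N p L b)
    (hx0 : -(N:Int) ≤ x) (hx1 : x < 0) (hF2 : 2 ≤ F) :
    findA F p x = findA F p (x + N) := by
  obtain ⟨hplen, hLlen, hLcl, hpcl, hroot, hdist⟩ := hInv
  obtain ⟨f, rfl⟩ : ∃ f, F = f + 2 := ⟨F - 2, by omega⟩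
  have hx'In : InR N (x + N) := ⟨by omega, by omega⟩
  have hx'p : 0 ≤ x + (N:Int) ∧ x + (N:Int) < (p.length : Int) := by rw [hplen]; exact ⟨by omega, by omega⟩
  have hget' : PySem.List.pyGet? p (x + N) = some (gI p (x + N)) := by
    rw [gI_eq_getElem p _ hx'p.1 hx'p.2]
    exact PySem.List.pyGet?_eq_some_getElem p hx'p.1 hx'p.2
  have hgetneg : PySem.List.pyGet? p x = some (gI p (x + N)) := by
    have hk1 : 0 < (-x).toNat := by omega
    have hk2 : (-x).toNat ≤ p.length := by omega
    have h := PySem.List.pyGet?_neg_natCast p (-x).toNat hk1 hk2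
    rw [show (-(((-x).toNat : Nat) : Int)) = x by omega] at h
    have hidx : p.length - (-x).toNat = (x + (N:Int)).toNat := by omega
    rw [h, gI_eq_getElem p _ hx'p.1 hx'p.2, List.getElem?_eq_getElem (by omega)]
    simp only [hidx]
  have hpxIn := (hpcl _ hx'In).1
  have hne : ¬ gI p (x + N) = x := by have := hpxIn.1; omega
  rw [show f + 2 = (f + 1) + 1 by omega]
  rw [findA_step (f+1) p x _ hgetneg, if_neg hne]
  rw [findA_step (f+1) p (x + N) _ hget']
  by_cases hr : gI p (x + N) = x + N
  · have hgg : gI p (gI p (x + N)) = x + N := by rw [hr]; exact hr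
    rw [if_pos hr, hgg]
    have hsetself : PySem.List.pySetD p x (x + N) = p := by
      rw [pySetD_neg p x _ (by rw [hplen]; omega) (by omega)]
      rw [show x + (p.length : Int) = x + N by rw [hplen]]
      nth_rewrite 2 [← hr]
      exact pySetD_self p _ (by omega) (by rw [hplen]; omega)
    rw [hsetself]
    rw [findA_step f p (x + N) _ hget', if_pos hr]
  · rw [if_neg hr]
    rw [pySetD_neg p x _ (by rw [hplen]; omega) (by omega)]
    rw [show x + (p.length : Int) = x + N by rw [hplen]]

lemma find_any {N L b F} (p : List Int) (x : Int) (hInv : UFInv N p L b)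
    (hx0 : -(N:Int) ≤ x) (hx1 : x < (N:Int)) (hbF : b < F) (hF2 : 2 ≤ F) :
    (findA F p x).2 = gI L x ∧ UFInv N (findA F p x).1 L b := by
  have hInv0 := hInv
  obtain ⟨hplen, hLlen, hLcl, hpcl, hroot, hdist⟩ := hInv
  by_cases hx : 0 ≤ x
  · have hxIn : InR N x := ⟨hx, hx1⟩
    obtain ⟨s, hs, hit⟩ := hdist x hxIn
    exact find_correct s F p x hInv0 hxIn hit (by omega)
  · rw [Int.not_le] at hx
    rw [find_neg F p x hInv0 (by omega) hx hF2]
    have hx'In : InR N (x + N) := ⟨by omega, by omega⟩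
    obtain ⟨s, hs, hit⟩ := hdist _ hx'In
    have h := find_correct s F p (x + N) hInv0 hx'In hit (by omega)
    have hLneg : gI L x = gI L (x + N) := by
      have := gI_neg L x (by rw [hLlen]; omega) hx
      rw [this, hLlen]
    rw [hLneg]
    exact h

lemma dist_keep {N p L} (hlen : p.length = N) (_hLlen : L.length = N)
    (hcl : ∀ x, InR N x → InR N (gI p x) ∧ gI L (gI p x) = gI L x)
    (ra rb : Int) (hrb : InR N rb) (hrbL : gI L rb = rb) :
    ∀ s y, InR N y → gI L y ≠ rb → iterP p s y = gI L y →
      iterP (PySem.List.pySetD p rb ra) s y = gI L y := by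
  intro s
  induction s with
  | zero => intro y _ _ hit; exact hit
  | succ s ih =>
    intro y hy hLy hit
    have hyrb : y ≠ rb := fun h => hLy (by rw [h]; exact hrbL)
    have hz := hcl y hy
    have hset : gI (PySem.List.pySetD p rb ra) y = gI p y := by
      rw [gI_set' hlen _ _ hrb _ hy, if_neg hyrb]
    show iterP _ s (gI (PySem.List.pySetD p rb ra) y) = gI L y
    rw [hset]
    rw [← hz.2]
    exact ih (gI p y) hz.1 (by rw [hz.2]; exact hLy) (by rw [hz.2]; exact hit)

lemma dist_absorb {N p L} (hlen : p.length = N) (_hLlen : L.length = N)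
    (hcl : ∀ x, InR N x → InR N (gI p x) ∧ gI L (gI p x) = gI L x)
    (ra rb : Int) (hrb : InR N rb) :
    ∀ s y, InR N y → iterP p s y = rb →
      ∃ s', s' ≤ s + 1 ∧ iterP (PySem.List.pySetD p rb ra) s' y = ra := by
  intro s
  induction s with
  | zero =>
    intro y _ hit
    have hyrb : y = rb := hit
    refine ⟨1, by omega, ?_⟩
    show gI (PySem.List.pySetD p rb ra) y = ra
    rw [hyrb, gI_set' hlen _ _ hrb _ hrb, if_pos rfl]
  | succ s ih =>
    intro y hy hit
    by_cases hyrb : y = rb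
    · refine ⟨1, by omega, ?_⟩
      show gI (PySem.List.pySetD p rb ra) y = ra
      rw [hyrb, gI_set' hlen _ _ hrb _ hrb, if_pos rfl]
    · have hz := hcl y hy
      obtain ⟨s', hs', hit'⟩ := ih (gI p y) hz.1 hit
      refine ⟨s' + 1, by omega, ?_⟩
      show iterP _ s' (gI (PySem.List.pySetD p rb ra) y) = ra
      rw [gI_set' hlen _ _ hrb _ hy, if_neg hyrb]
      exact hit'

lemma Inv_union {N p L b} (hInv : UFInv N p L b) (ra rb : Int)
    (hra : InR N ra) (hrb : InR N rb) (hraL : gI L ra = ra) (hrbL : gI L rb = rb)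
    (hne : ra ≠ rb) (hpra : gI p ra = ra) :
    UFInv N (PySem.List.pySetD p rb ra) (relabel L ra rb) (b + 1) := by
  obtain ⟨hplen, hLlen, hLcl, hpcl, hroot, hdist⟩ := hInv
  have hrel : ∀ y : Int, InR N y → gI (relabel L ra rb) y = if gI L y = rb then ra else gI L y := by
    intro y hy
    exact gI_relabel L ra rb y hy.1 (by rw [hLlen]; exact hy.2)
  refine ⟨by rw [length_pySetD']; exact hplen, by simp [relabel, hLlen], ?_, ?_, ?_, ?_⟩
  · intro y hy
    rw [hrel y hy]
    by_cases h : gI L y = rb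
    · rw [if_pos h, hrel ra hra, if_neg (by rw [hraL]; exact hne), hraL]
      exact ⟨hra, rfl⟩
    · rw [if_neg h, hrel _ (hLcl y hy).1, (hLcl y hy).2, if_neg h]
      exact ⟨(hLcl y hy).1, rfl⟩
  · intro y hy
    rw [gI_set' hplen _ _ hrb _ hy]
    by_cases h : y = rb
    · rw [if_pos h, hrel ra hra, hrel y hy, if_neg (by rw [hraL]; exact hne)]
      rw [h, if_pos hrbL, hraL]
      exact ⟨hra, rfl⟩
    · rw [if_neg h]
      refine ⟨(hpcl y hy).1, ?_⟩
      rw [hrel _ (hpcl y hy).1, hrel y hy, (hpcl y hy).2]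
  · intro y hy
    rw [hrel y hy]
    by_cases h : gI L y = rb
    · rw [if_pos h, gI_set' hplen _ _ hrb _ hra, if_neg hne, hpra]
    · rw [if_neg h, gI_set' hplen _ _ hrb _ (hLcl y hy).1, if_neg h]
      exact hroot y hy
  · intro y hy
    obtain ⟨s, hs, hit⟩ := hdist y hy
    rw [hrel y hy]
    by_cases h : gI L y = rb
    · rw [if_pos h]
      obtain ⟨s', hs', hit'⟩ := dist_absorb hplen hLlen hpcl ra rb hrb s y hy (by rw [← h]; exact hit)
      exact ⟨s', by omega, hit'⟩
    · rw [if_neg h]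
      exact ⟨s, by omega, dist_keep hplen hLlen hpcl ra rb hrb hrbL s y hy h hit⟩

lemma root_facts {N L b} (p : List Int) (hInv : UFInv N p L b) (i : Int)
    (hi0 : -(N:Int) ≤ i) (hi1 : i < (N:Int)) :
    InR N (gI L i) ∧ gI L (gI L i) = gI L i ∧ gI p (gI L i) = gI L i := by
  obtain ⟨hplen, hLlen, hLcl, hpcl, hroot, _⟩ := hInv
  by_cases h : 0 ≤ i
  · exact ⟨(hLcl i ⟨h, hi1⟩).1, (hLcl i ⟨h, hi1⟩).2, hroot i ⟨h, hi1⟩⟩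
  · have hneg : gI L i = gI L (i + N) := by
      have h' := gI_neg L i (by rw [hLlen]; omega) (by omega)
      rw [h', hLlen]
    have hin : InR N (i + N) := ⟨by omega, by omega⟩
    rw [hneg]
    exact ⟨(hLcl _ hin).1, (hLcl _ hin).2, hroot _ hin⟩

lemma union_step {N L b F} (p : List Int) (i j : Int) (hInv : UFInv N p L b)
    (hi : -(N:Int) ≤ i ∧ i < (N:Int)) (hj : -(N:Int) ≤ j ∧ j < (N:Int))
    (hbF : b + 1 < F) (hF2 : 2 ≤ F) :
    UFInv N (unionA F p i j)
      (if gI L i ≠ gI L j then relabel L (gI L i) (gI L j) else L) (b + 1) := by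
  obtain ⟨hv1, hI1⟩ := find_any p i hInv hi.1 hi.2 (by omega) hF2
  obtain ⟨hv2, hI2⟩ := find_any (findA F p i).1 j hI1 hj.1 hj.2 (by omega) hF2
  simp only [unionA]
  rw [hv1, hv2]
  by_cases h : gI L i = gI L j
  · rw [if_neg (fun hn => hn h), if_neg (fun hn => hn h)]
    exact Inv_mono hI2 (by omega)
  · rw [if_pos h, if_pos h]
    obtain ⟨hiIn, hiId, _⟩ := root_facts p hInv i hi.1 hi.2
    obtain ⟨hjIn, hjId, _⟩ := root_facts p hInv j hj.1 hj.2
    obtain ⟨_, _, hifix⟩ := root_facts (findA F (findA F p i).1 j).1 hI2 i hi.1 hi.2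
    obtain ⟨_, _, hjfix⟩ := root_facts (findA F (findA F p i).1 j).1 hI2 j hj.1 hj.2
    exact Inv_union hI2 (gI L i) (gI L j) hiIn hjIn hiId hjId h hifix

lemma fold_merges {N F} : ∀ (ml : List (Int × Int)) (p L : List Int) (b : Nat),
    UFInv N p L b →
    (∀ ij ∈ ml, (-(N:Int) ≤ ij.1 ∧ ij.1 < (N:Int)) ∧ (-(N:Int) ≤ ij.2 ∧ ij.2 < (N:Int))) →
    b + ml.length < F → 2 ≤ F →
    UFInv N (ml.foldl (fun p ij => unionA F p ij.1 ij.2) p)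
      (ml.foldl (fun (L : List Int) ij =>
        let li := PySem.List.pyGetD L ij.1 0
        let lj := PySem.List.pyGetD L ij.2 0
        if li ≠ lj then L.map (fun v => if v = lj then li else v) else L) L)
      (b + ml.length) := by
  intro ml
  induction ml with
  | nil => intro p L b hInv _ _ _; simpa using hInv
  | cons ij tl ih =>
    intro p L b hInv hpairs hbF hF2
    simp only [List.foldl_cons]
    have hstep := union_step p ij.1 ij.2 hInv (hpairs ij (by simp)).1 (hpairs ij (by simp)).2
      (by simp [List.length_cons] at hbF; omega) hF2
    have hres := ih (unionA F p ij.1 ij.2)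
      (if gI L ij.1 ≠ gI L ij.2 then relabel L (gI L ij.1) (gI L ij.2) else L) (b + 1)
      hstep (fun x hx => hpairs x (by simp [hx]))
      (by simp [List.length_cons] at hbF; omega) hF2
    rw [show b + (ij :: tl).length = (b + 1) + tl.length by simp [List.length_cons]; omega]
    exact hres

lemma fold_group {N L b F} (hbF : b < F) (hF2 : 2 ≤ F) :
    ∀ (is : List Int) (p : List Int) (d : PySem.Dict Int (List Int)),
    UFInv N p L b → (∀ i ∈ is, InR N i) →
    (is.foldl (fun (st : List Int × PySem.Dict Int (List Int)) i =>
        let fr := findA F st.1 i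
        (fr.1, st.2.insert fr.2 (st.2.getD fr.2 [] ++ [i]))) (p, d)).2
    = is.foldl (fun (d : PySem.Dict Int (List Int)) v =>
        let k := PySem.List.pyGetD L v 0
        d.insert k (d.getD k [] ++ [v])) d := by
  intro is
  induction is with
  | nil => intro p d _ _; rfl
  | cons i tl ih =>
    intro p d hInv hmem
    have hiIn : InR N i := hmem i (by simp)
    obtain ⟨hv, hI⟩ := find_any p i hInv (by obtain ⟨a, c⟩ := hiIn; omega) hiIn.2 hbF hF2
    simp only [List.foldl_cons]
    rw [hv]
    exact ih (findA F p i).1 (d.insert (gI L i) (d.getD (gI L i) [] ++ [i]))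
      hI (fun x hx => hmem x (by simp [hx]))

lemma Inv_init (n : Int) (hn : 0 < n) :
    UFInv n.toNat (PySem.List.pyRange 0 n 1) (PySem.List.pyRange 0 n 1) 0 := by
  have hlen : (PySem.List.pyRange 0 n 1).length = n.toNat := by
    rw [PySem.List.length_pyRange_one]; omega
  have hid : ∀ x : Int, InR n.toNat x → gI (PySem.List.pyRange 0 n 1) x = x := by
    intro x hx
    obtain ⟨a, c⟩ := hx
    rw [gI_eq_getElem _ _ a (by rw [hlen]; omega)]
    rw [PySem.List.getElem_pyRange_one 0 n x.toNat
      (by rw [PySem.List.length_pyRange_one]; omega)]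
    omega
  refine ⟨hlen, hlen, ?_, ?_, ?_, ?_⟩
  · intro x hx; rw [hid x hx, hid x hx]; exact ⟨hx, rfl⟩
  · intro x hx; rw [hid x hx, hid x hx]; exact ⟨hx, rfl⟩
  · intro x hx; rw [hid x hx, hid x hx]
  · intro x hx; exact ⟨0, le_refl _, (hid x hx).symm⟩

-- ===== VERDICT (by name: the statement is the Claim_ definition above) =====
theorem merge_list_to_clusters_spec : Claim_equal_merge_list_to_clusters := by
  intro n ml _hDom hPre
  show merge_list_to_clusters n ml = merge_list_to_clusters_alt n ml
  by_cases hn : n ≤ 0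
  · have hml : ml = [] := by
      cases ml with
      | nil => rfl
      | cons hd tl =>
        exfalso
        obtain ⟨⟨a, c⟩, -⟩ := hPre hd (by simp)
        omega
    subst hml
    simp only [merge_list_to_clusters, merge_list_to_clusters_alt,
      PySem.List.pyRange_one_eq_nil hn, List.foldl_nil]
  · have hn' : 0 < n := by omega
    have hInv0 := Inv_init n hn'
    simp only [merge_list_to_clusters, merge_list_to_clusters_alt]
    set F := (PySem.List.pyRange 0 n 1).length + ml.length + 1 with hF
    have hFval : F = n.toNat + ml.length + 1 := by
      rw [hF, PySem.List.length_pyRange_one]; omega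
    have hpairs : ∀ ij ∈ ml,
        (-((n.toNat : Nat) : Int) ≤ ij.1 ∧ ij.1 < ((n.toNat : Nat) : Int)) ∧
        (-((n.toNat : Nat) : Int) ≤ ij.2 ∧ ij.2 < ((n.toNat : Nat) : Int)) := by
      intro ij hij
      obtain ⟨⟨a, c⟩, a2, c2⟩ := hPre ij hij
      exact ⟨⟨by omega, by omega⟩, by omega, by omega⟩
    have hmerged := fold_merges (N := n.toNat) (F := F) ml
      (PySem.List.pyRange 0 n 1) (PySem.List.pyRange 0 n 1) 0 hInv0 hpairs
      (by omega) (by omega)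
    have hmem : ∀ i ∈ PySem.List.pyRange 0 n 1, InR n.toNat i := by
      intro i hi
      rw [PySem.List.mem_pyRange_one] at hi
      exact ⟨hi.1, by omega⟩
    have hgroup := fold_group (F := F) (b := 0 + ml.length) (hbF := by omega) (hF2 := by omega)
      (PySem.List.pyRange 0 n 1)
      (ml.foldl (fun p ij => unionA F p ij.1 ij.2) (PySem.List.pyRange 0 n 1))
      PySem.Dict.empty hmerged hmem
    exact congrArg PySem.Dict.values hgroup
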